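-- pv_equiv track=rewrite | github.com/mtn6807/CSEC380 | Homework3/activityTwo/userAgent.py | pull_html
-- ===== SOURCE A (Python) =====
-- def pull_html(resp):
--     holder = []
--     first = True
--     for x in resp.split('\n\n'):
--         if not first:
--             holder.append(x)
--         first = False
--     return "".join(holder)
-- ===== SOURCE B (Python) =====
-- def pull_html(resp):
--     parts = resp.split('\n\n', 1)
--     if len(parts) < 2:
--         return ''
--     return parts[1].replace('\n\n', '')
-- ===== Notes on version B (the rewrite author's own statement) =====
-- stated objective: simpler
-- what changed: Replaces the full split plus skip-first-flag loop plus join with a single bounded split at the first blank-line separator and a replace that deletes the remaining separators; no list is built or folded.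
import Mathlib
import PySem

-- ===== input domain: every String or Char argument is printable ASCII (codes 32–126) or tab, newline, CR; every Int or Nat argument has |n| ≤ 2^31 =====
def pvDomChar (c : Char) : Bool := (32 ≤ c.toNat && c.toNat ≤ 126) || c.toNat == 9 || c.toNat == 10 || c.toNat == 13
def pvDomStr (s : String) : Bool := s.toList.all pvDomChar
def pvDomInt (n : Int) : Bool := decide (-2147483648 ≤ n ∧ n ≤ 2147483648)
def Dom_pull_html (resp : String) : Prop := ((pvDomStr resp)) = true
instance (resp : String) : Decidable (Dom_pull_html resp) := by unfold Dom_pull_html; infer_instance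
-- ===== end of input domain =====

-- B replaces A's full split + skip-first-flag loop + join by one bounded split at the first
-- blank-line separator and a replace deleting the remaining separators (objective: simpler).

-- ===== PORT A =====
def pull_html (resp : String) : String :=
  let parts := (PySem.Str.split? resp "\n\n").getD []   -- sep "\n\n" ≠ "": never none
  let st := parts.foldl
    (fun (acc : List String × Bool) x => ((if acc.2 then acc.1 else acc.1 ++ [x]), false))
    ([], true)
  PySem.Str.join "" st.1

-- ===== PORT B =====
def pull_html_alt (resp : String) : String :=
  let parts := (PySem.Str.splitMax? resp "\n\n" 1).getD []   -- sep "\n\n" ≠ "": never none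
  match parts with
  | _ :: p1 :: _ => PySem.Str.replace p1 "\n\n" ""
  | _ => ""

-- ===== PRECONDITION & SPEC =====
def Spec_pull_html (resp : String) (out : String) : Prop := out = pull_html_alt resp
instance (resp : String) (out : String) : Decidable (Spec_pull_html resp out) := by unfold Spec_pull_html; infer_instance

-- ===== CLAIM (what is proved, stated in full; the proofs are below) =====
def Claim_equal_pull_html : Prop := ∀ (resp : String), Dom_pull_html resp → Spec_pull_html resp (pull_html resp)

-- ===== LEMMAS AND PROOFS =====

def sepNN : List Char := ['\n', '\n']

-- reference splitter: splitOn on sepNN, structurally recursive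
def splitG : List Char → List (List Char)
  | [] => [[]]
  | c :: rest =>
    if sepNN.isPrefixOf (c :: rest) then [] :: splitG ((c :: rest).drop 2)
    else (splitG rest).modifyHead (c :: ·)
termination_by l => l.length
decreasing_by all_goals (simp; try omega)

-- reference separator deletion: replace · sepNN []
def repG : List Char → List Char
  | [] => []
  | c :: rest =>
    if sepNN.isPrefixOf (c :: rest) then repG ((c :: rest).drop 2)
    else c :: repG rest
termination_by l => l.length
decreasing_by all_goals (simp; try omega)

-- reference single split: (first piece, rest after first sepNN if any)
def sm1G : List Char → List Char × Option (List Char)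
  | [] => ([], none)
  | c :: rest =>
    if sepNN.isPrefixOf (c :: rest) then ([], some ((c :: rest).drop 2))
    else (c :: (sm1G rest).1, (sm1G rest).2)

lemma foldA (t : List String) (h : List String) :
    (t.foldl (fun (acc : List String × Bool) x => ((if acc.2 then acc.1 else acc.1 ++ [x]), false)) (h, false)).1
      = h ++ t := by
  induction t generalizing h with
  | nil => simp
  | cons x t ih => simp [List.foldl, ih]

lemma join_nil_flatten (ps : List (List Char)) : PySem.Chars.join [] ps = ps.flatten := by
  simp only [PySem.Chars.join]
  induction ps with
  | nil => rfl
  | cons a t ih => cases t <;> simp_all [List.intercalate, List.intersperse]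

lemma splitG_ne_nil (l : List Char) : splitG l ≠ [] := by
  induction l using splitG.induct with
  | case1 => simp [splitG]
  | case2 c rest hp ih => rw [splitG, if_pos hp]; simp
  | case3 c rest hp ih =>
    rw [splitG, if_neg hp]
    cases h : splitG rest with
    | nil => exact absurd h ih
    | cons a t => simp

lemma flatten_splitG (l : List Char) : (splitG l).flatten = repG l := by
  induction l using splitG.induct with
  | case1 => simp [splitG, repG]
  | case2 c rest hp ih =>
    rw [splitG, repG, if_pos hp, if_pos hp]; simpa using ih
  | case3 c rest hp ih =>
    rw [splitG, repG, if_neg hp, if_neg hp]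
    cases h : splitG rest with
    | nil => exact absurd h (splitG_ne_nil rest)
    | cons a t => rw [h] at ih; simp [← ih]

lemma go_split (fuel : Nat) : ∀ (l cur acc : _), l.length < fuel →
    PySem.Chars.splitOn.go sepNN fuel l cur acc
      = acc.reverse ++ (splitG l).modifyHead (cur.reverse ++ ·) := by
  induction fuel with
  | zero => intro l cur acc h; omega
  | succ fuel ih =>
    intro l cur acc h
    cases l with
    | nil => simp [PySem.Chars.splitOn.go, splitG]
    | cons c rest =>
      rw [PySem.Chars.splitOn.go, splitG]
      simp only [show sepNN.length = 2 from rfl]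
      split_ifs with hp
      · rw [ih _ _ _ (by simp at h ⊢; omega)]
        cases hs : splitG ((c :: rest).drop 2) with
        | nil => exact absurd hs (splitG_ne_nil _)
        | cons a t => simp
      · rw [ih _ _ _ (by simp at h ⊢; omega)]
        cases hs : splitG rest with
        | nil => exact absurd hs (splitG_ne_nil _)
        | cons a t => simp

lemma splitOn_eq (l : List Char) : PySem.Chars.splitOn l sepNN = splitG l := by
  rw [PySem.Chars.splitOn, go_split (l.length + 1) l [] [] (by omega)]
  cases hs : splitG l with
  | nil => exact absurd hs (splitG_ne_nil _)
  | cons a t => simp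

lemma go_rep (fuel : Nat) : ∀ (l acc : _), l.length ≤ fuel →
    PySem.Chars.replace.go sepNN [] fuel l acc = acc.reverse ++ repG l := by
  induction fuel with
  | zero =>
    intro l acc h
    have : l = [] := by cases l <;> simp_all
    subst this; simp [PySem.Chars.replace.go, repG]
  | succ fuel ih =>
    intro l acc h
    cases l with
    | nil => simp [PySem.Chars.replace.go, repG]
    | cons c rest =>
      rw [PySem.Chars.replace.go, repG]
      simp only [show sepNN.length = 2 from rfl]
      split_ifs with hp
      · rw [ih _ _ (by simp at h ⊢; omega)]; simp
      · rw [ih _ _ (by simp at h ⊢; omega)]; simp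

lemma replace_eq (l : List Char) : PySem.Chars.replace l sepNN [] = repG l := by
  rw [PySem.Chars.replace]
  simp only [sepNN, List.isEmpty]
  exact (go_rep l.length l [] (by omega)).trans (by simp)

lemma go_sm0 (fuel : Nat) : ∀ (l cur acc : _), l.length < fuel →
    PySem.Chars.splitOnMax.go sepNN fuel 0 l cur acc = acc.reverse ++ [cur.reverse ++ l] := by
  intro l cur acc h
  cases fuel with
  | zero => omega
  | succ fuel =>
    cases l with
    | nil => simp [PySem.Chars.splitOnMax.go]
    | cons c rest => rw [PySem.Chars.splitOnMax.go]; simp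

lemma go_sm1 (fuel : Nat) : ∀ (l cur acc : _), l.length < fuel →
    PySem.Chars.splitOnMax.go sepNN fuel 1 l cur acc
      = acc.reverse ++ (match (sm1G l).2 with
          | none => [cur.reverse ++ (sm1G l).1]
          | some r => [cur.reverse ++ (sm1G l).1, r]) := by
  induction fuel with
  | zero => intro l cur acc h; omega
  | succ fuel ih =>
    intro l cur acc h
    cases l with
    | nil => simp [PySem.Chars.splitOnMax.go, sm1G]
    | cons c rest =>
      rw [PySem.Chars.splitOnMax.go, sm1G]
      rw [if_neg (by omega : ¬ (1 : Nat) = 0)]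
      simp only [show sepNN.length = 2 from rfl]
      split_ifs with hp
      · rw [go_sm0 fuel _ _ _ (by simp at h ⊢; omega)]; simp
      · rw [ih _ _ _ (by simp at h ⊢; omega)]
        cases (sm1G rest).2 <;> simp

lemma splitOnMax_one_eq (l : List Char) :
    PySem.Chars.splitOnMax l sepNN 1
      = (match (sm1G l).2 with
          | none => [(sm1G l).1]
          | some r => [(sm1G l).1, r]) := by
  rw [PySem.Chars.splitOnMax]
  rw [if_neg (by omega)]
  simp only [show Int.toNat 1 = 1 from rfl]
  rw [go_sm1 (l.length + 1) l [] [] (by omega)]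
  cases (sm1G l).2 <;> simp

lemma splitG_sm1 (l : List Char) :
    splitG l = (sm1G l).1 :: (match (sm1G l).2 with | none => [] | some r => splitG r) := by
  induction l using splitG.induct with
  | case1 => simp [splitG, sm1G]
  | case2 c rest hp ih =>
    rw [splitG, sm1G, if_pos hp, if_pos hp]
  | case3 c rest hp ih =>
    rw [splitG, sm1G, if_neg hp, if_neg hp]
    rw [ih]
    cases (sm1G rest).2 <;> simp

lemma foldA1 (x : String) (t : List String) :
    (List.foldl (fun (acc : List String × Bool) x => ((if acc.2 then acc.1 else acc.1 ++ [x]), false)) ([], true) (x :: t)).1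
      = t := by
  simp [List.foldl, foldA]

-- ===== VERDICT (by name: the statement is the Claim_ definition above) =====
theorem pull_html_spec : Claim_equal_pull_html := by
  intro resp _
  unfold Spec_pull_html pull_html pull_html_alt
  have hsep : ("\n\n" : String).toList = sepNN := by decide
  simp only [PySem.Str.split?, PySem.Str.splitMax?, hsep,
    PySem.Chars.split?, PySem.Chars.splitMax?]
  rw [if_neg (by decide), if_neg (by decide)]
  simp only [Option.map_some, Option.getD_some]
  rw [splitOn_eq, splitOnMax_one_eq, splitG_sm1]
  cases hs : (sm1G resp.toList).2 with
  | none =>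
    simp only [List.map]
    simp [List.foldl, PySem.Str.join, PySem.Chars.join, List.intercalate]
  | some r =>
    simp only [List.map]
    rw [foldA1]
    show PySem.Str.join "" (List.map String.ofList (splitG r))
        = PySem.Str.replace (String.ofList r) "\n\n" ""
    rw [PySem.Str.join, PySem.Str.replace]
    congr 1
    simp only [List.map_map, hsep]
    show PySem.Chars.join [] _ = _
    rw [show String.toList ∘ String.ofList = (id : List Char → List Char) from
      funext (fun l => (String.toList_ofList : (String.ofList l).toList = l)), List.map_id]
    rw [join_nil_flatten, flatten_splitG, String.toList_ofList,
      show ("" : String).toList = [] from rfl, replace_eq]
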